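-- pv_equiv track=rewrite | github.com/delaanthonio/hackerrank | contests/week_of_code_34/maximum_gcd_and_sum.py | gcd_sum
-- ===== SOURCE A (Python) =====
-- from typing import Iterator, List
--
-- def isqrt(n: int) -> int:
--     """Return the square root of an integer."""
--     x = n
--     y = (x + 1) // 2
--     while y < x:
--         x, y = y, (y + n // y) // 2
--     return x
--
-- def factor(num: int) -> Iterator[int]:
--     """>>> factor(30) -> [2, 3, 5, 6, 10, 15, 30]."""
--     yield num
--     for i in range(2, isqrt(num) + 1):
--         if num % i == 0:
--             yield i
--             yield num // i
--
-- def gcd_sum(arr_a: Iterator[int], arr_b: Iterator[int]) -> int: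
--     """Calculate max gcd sum.
--     Complexity: O(n * sqrt(n)).
--     """
--     max_gcd = 0
--
--     divs_a = {}  # type: Dict[int, int]
--     divs_b = {}  # type: Dict[int, int]
--     max_sum = 0
--     arr_a = sorted(arr_a, reverse=True)
--     arr_b = sorted(arr_b, reverse=True)
--     for num_a, num_b in zip(arr_a, arr_b):
--         if num_a < max_gcd and num_b < max_gcd:
--             return max_sum
--         additions_a = (x for x in factor(num_a) if x not in divs_a)
--         for i in additions_a:
--             if i in divs_b and i > max_gcd:
--                 max_gcd = i
--                 max_sum = divs_b[i] + num_a
--             divs_a[i] = num_a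
--         additions_b = (x for x in factor(num_b) if x not in divs_b)
--         for i in additions_b:
--             if i in divs_a and i > max_gcd:
--                 max_gcd = i
--                 max_sum = divs_a[i] + num_b
--             divs_b[i] = num_b
--
--     return max_sum
-- ===== SOURCE B (Python) =====
-- def isqrt(n: int) -> int:
--     """Return the square root of an integer."""
--     x = n
--     y = (x + 1) // 2
--     while y < x:
--         x, y = y, (y + n // y) // 2
--     return x
--
--
-- def _divisors(num: int) -> set:
--     """All divisors reachable by the trial scan, as a set (num, and i / num//i for i up to isqrt)."""
--     divs = {num}
--     for i in range(2, isqrt(num) + 1):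
--         if num % i == 0:
--             divs.add(i)
--             divs.add(num // i)
--     return divs
--
--
-- def gcd_sum(arr_a, arr_b):
--     """Calculate max gcd sum: build full divisor->max-element tables, then one intersection pass."""
--     a = sorted(arr_a, reverse=True)
--     b = sorted(arr_b, reverse=True)
--     k = min(len(a), len(b))
--     map_a = {}
--     for x in a[:k]:
--         for d in _divisors(x):
--             map_a.setdefault(d, x)
--     map_b = {}
--     for y in b[:k]:
--         for d in _divisors(y):
--             map_b.setdefault(d, y)
--     best = 0
--     for g in map_a:
--         if g > best and g in map_b:
--             best = g
--     return map_a[best] + map_b[best] if best > 0 else 0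
-- ===== Notes on version B (the rewrite author's own statement) =====
-- stated objective: alternative
-- what changed: Replaces A's interleaved incremental scan (two dicts updated pair-by-pair with a running max-gcd and early exit) by a bulk build of two divisor->max-element tables over the truncated sorted arrays followed by one intersection pass picking the largest common divisor; B forgoes A's early exit.
import Mathlib
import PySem

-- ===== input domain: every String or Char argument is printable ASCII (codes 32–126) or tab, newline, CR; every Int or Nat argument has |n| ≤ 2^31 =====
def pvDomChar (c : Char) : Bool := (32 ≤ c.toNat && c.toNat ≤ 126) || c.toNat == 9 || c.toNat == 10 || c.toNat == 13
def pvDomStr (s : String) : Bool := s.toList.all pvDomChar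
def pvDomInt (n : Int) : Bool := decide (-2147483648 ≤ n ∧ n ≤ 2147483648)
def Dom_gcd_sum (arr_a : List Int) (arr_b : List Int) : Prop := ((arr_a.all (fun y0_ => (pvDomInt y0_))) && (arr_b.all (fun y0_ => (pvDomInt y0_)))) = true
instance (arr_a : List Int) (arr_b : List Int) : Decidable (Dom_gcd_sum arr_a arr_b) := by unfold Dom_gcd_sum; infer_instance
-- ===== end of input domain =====

-- B replaces A's interleaved incremental scan + early exit by building full divisor->max-element
-- tables over the K largest elements of each array and taking one intersection pass (objective:
-- alternative; B forgoes A's early exit, so it can do more work than A on large inputs).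

-- ===== PORT A =====
-- isqrt's while loop, with fuel n.toNat+1: x strictly decreases each iteration and (for n ≥ 2,
-- the only case with iterations) stays ≥ 1, so the loop runs at most n times — the fuel is never exhausted.
def isqrtLoop (n : Int) : Int → Int → Nat → Int
  | x, _, 0 => x
  | x, y, fuel + 1 =>
    if y < x then isqrtLoop n y (PySem.Int.floordiv (y + PySem.Int.floordiv n y) 2) fuel else x

def isqrt (n : Int) : Int := isqrtLoop n n (PySem.Int.floordiv (n + 1) 2) (n.toNat + 1)

-- factor(num) as the list of yielded values (a generator consumed eagerly by both of A's loops)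
def factorList (num : Int) : List Int :=
  num :: (PySem.List.pyRange 2 (isqrt num + 1)).foldl
    (fun acc i => if PySem.Int.mod num i = 0 then acc ++ [i, PySem.Int.floordiv num i] else acc) []

-- one of A's two symmetric inner loops: iterate the divisors of `num` not yet in the own dict,
-- update (max_gcd, max_sum) against the other dict, and record the divisor
def onePass (other : PySem.Dict Int Int) (num : Int)
    (st : PySem.Dict Int Int × Int × Int) : PySem.Dict Int Int × Int × Int :=
  (factorList num).foldl (fun st i =>
    if st.1.contains i then st
    else if other.contains i ∧ st.2.1 < i then (st.1.insert i num, i, other.getD i 0 + num)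
    else (st.1.insert i num, st.2.1, st.2.2)) st

def gcdLoop : List (Int × Int) → PySem.Dict Int Int → PySem.Dict Int Int → Int → Int → Int
  | [], _, _, _, s => s
  | (na, nb) :: rest, da, db, g, s =>
    if na < g ∧ nb < g then s
    else
      let ra := onePass db na (da, g, s)
      let rb := onePass ra.1 nb (db, ra.2.1, ra.2.2)
      gcdLoop rest ra.1 rb.1 rb.2.1 rb.2.2

def gcd_sum (arr_a : List Int) (arr_b : List Int) : Int :=
  let sa := PySem.List.sorted arr_a (fun x => x) true
  let sb := PySem.List.sorted arr_b (fun x => x) true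
  gcdLoop (sa.zip sb) PySem.Dict.empty PySem.Dict.empty 0 0

-- ===== PORT B =====
-- _divisors(num): same trial scan, collected into a set
def divSet (num : Int) : PySem.Set Int :=
  (PySem.List.pyRange 2 (isqrt num + 1)).foldl
    (fun s i => if PySem.Int.mod num i = 0 then PySem.Set.add (PySem.Set.add s i) (PySem.Int.floordiv num i) else s)
    (PySem.Set.ofList [num])

-- one of Source B's two identical table-building loops: divisor -> first-seen (= max, list sorted desc) element
def buildMap (xs : List Int) : PySem.Dict Int Int :=
  xs.foldl (fun m x => (divSet x).foldl (fun m d => m.setdefault d x) m) PySem.Dict.empty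

def gcd_sum_alt (arr_a : List Int) (arr_b : List Int) : Int :=
  let a := PySem.List.sorted arr_a (fun x => x) true
  let b := PySem.List.sorted arr_b (fun x => x) true
  let k : Int := min (PySem.List.len a) (PySem.List.len b)
  let mapA := buildMap (PySem.List.slice a none (some k))
  let mapB := buildMap (PySem.List.slice b none (some k))
  let best := mapA.keys.foldl (fun best g => if best < g ∧ mapB.contains g then g else best) 0
  if 0 < best then mapA.getD best 0 + mapB.getD best 0 else 0

-- ===== PRECONDITION & SPEC =====
def Spec_gcd_sum (arr_a : List Int) (arr_b : List Int) (out : Int) : Prop := out = gcd_sum_alt arr_a arr_b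
instance (arr_a : List Int) (arr_b : List Int) (out : Int) : Decidable (Spec_gcd_sum arr_a arr_b out) := by unfold Spec_gcd_sum; infer_instance

-- ===== CLAIM (what is proved, stated in full; the proofs are below) =====
def Claim_equal_gcd_sum : Prop := ∀ (arr_a : List Int) (arr_b : List Int), Dom_gcd_sum arr_a arr_b → Spec_gcd_sum arr_a arr_b (gcd_sum arr_a arr_b)

-- ===== LEMMAS AND PROOFS =====

-- first element of xs whose factor list contains d (the value both dicts associate to key d)
def fw (d : Int) (xs : List Int) : Option Int := xs.find? (fun x => decide (d ∈ factorList x))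

-- d occurs as a "divisor" (factor-list member) on both sides
def CommonD (A B : List Int) (d : Int) : Prop :=
  (∃ x ∈ A, d ∈ factorList x) ∧ (∃ y ∈ B, d ∈ factorList y)

-- g is the max positive common divisor (0 if none)
def IsBest (A B : List Int) (g : Int) : Prop :=
  (g = 0 ∧ ∀ d, 0 < d → ¬ CommonD A B d) ∨
  (0 < g ∧ CommonD A B g ∧ ∀ d, 0 < d → CommonD A B d → d ≤ g)

def sumFor (A B : List Int) (g : Int) : Int := (fw g A).getD 0 + (fw g B).getD 0

-- A's loop invariant between pairs
def StInv (As Bs : List Int) (da db : PySem.Dict Int Int) (g s : Int) : Prop :=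
  (∀ k, da.get? k = fw k As) ∧ (∀ k, db.get? k = fw k Bs) ∧ IsBest As Bs g ∧ 0 ≤ g ∧
  (g = 0 → s = 0) ∧ (0 < g → s = sumFor As Bs g)

lemma fw_isSome_iff (d : Int) (xs : List Int) :
    (fw d xs).isSome ↔ ∃ x ∈ xs, d ∈ factorList x := by
  simp [fw, List.find?_isSome]

lemma fw_append (d : Int) (xs ys : List Int) : fw d (xs ++ ys) = (fw d xs).or (fw d ys) :=
  List.find?_append

lemma fw_snoc (k : Int) (xs : List Int) (x : Int) :
    fw k (xs ++ [x]) = if (fw k xs).isSome then fw k xs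
      else if k ∈ factorList x then some x else none := by
  rw [fw_append]
  cases hxs : fw k xs with
  | some v => simp
  | none =>
    by_cases hm : k ∈ factorList x <;> simp [fw, List.find?, hm]

lemma fw_append_of_isSome (k : Int) (xs ys : List Int) (h : (fw k xs).isSome) :
    fw k (xs ++ ys) = fw k xs := by
  rw [fw_append]
  cases hxs : fw k xs with
  | some v => simp
  | none => rw [hxs] at h; simp at h

lemma fw_snoc_isSome (k : Int) (xs : List Int) (x : Int) :
    (fw k (xs ++ [x])).isSome ↔ ((fw k xs).isSome ∨ k ∈ factorList x) := by
  rw [fw_snoc]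
  by_cases h1 : (fw k xs).isSome
  · simp [h1]
  · by_cases h2 : k ∈ factorList x <;> simp [h1, h2]

lemma isBest_unique {A B : List Int} {g g' : Int} (h : IsBest A B g) (h' : IsBest A B g') :
    g = g' := by
  rcases h with ⟨h0, hno⟩ | ⟨hp, hc, hm⟩ <;> rcases h' with ⟨h0', hno'⟩ | ⟨hp', hc', hm'⟩
  · omega
  · exact absurd hc' (hno _ hp')
  · exact absurd hc (hno' _ hp)
  · exact le_antisymm (hm' _ hp hc) (hm _ hp' hc')

lemma commonD_mono {A B : List Int} {d : Int} (xs ys : List Int) (h : CommonD A B d) :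
    CommonD (A ++ xs) (B ++ ys) d := by
  obtain ⟨⟨x, hx, hdx⟩, ⟨y, hy, hdy⟩⟩ := h
  exact ⟨⟨x, List.mem_append.2 (Or.inl hx), hdx⟩, ⟨y, List.mem_append.2 (Or.inl hy), hdy⟩⟩

lemma bestMax {A B : List Int} {g : Int} (h : IsBest A B g) :
    ∀ d, 0 < d → CommonD A B d → d ≤ g := by
  rcases h with ⟨_, hno⟩ | ⟨_, _, hm⟩
  · exact fun d hd hc => absurd hc (hno d hd)
  · exact hm

lemma isqrtLoop_le (n : Int) : ∀ (x y : Int) (fuel : Nat), isqrtLoop n x y fuel ≤ x := by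
  intro x y fuel
  induction fuel generalizing x y with
  | zero => simp [isqrtLoop]
  | succ f ih =>
    simp only [isqrtLoop]
    split
    · exact le_trans (ih _ _) (le_of_lt ‹_›)
    · exact le_refl x

lemma isqrt_le (n : Int) : isqrt n ≤ n := isqrtLoop_le n n _ _

lemma mem_factorList (x d : Int) :
    d ∈ factorList x ↔ d = x ∨ ∃ i, i ∈ PySem.List.pyRange 2 (isqrt x + 1) ∧
      PySem.Int.mod x i = 0 ∧ (d = i ∨ d = PySem.Int.floordiv x i) := by
  have hcongr : (PySem.List.pyRange 2 (isqrt x + 1)).foldl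
      (fun acc i => if PySem.Int.mod x i = 0 then acc ++ [i, PySem.Int.floordiv x i] else acc) [] =
      (PySem.List.pyRange 2 (isqrt x + 1)).flatMap
        (fun i => if PySem.Int.mod x i = 0 then [i, PySem.Int.floordiv x i] else []) := by
    rw [PySem.List.foldl_congr_mem
      (g := fun acc i => acc ++ (if PySem.Int.mod x i = 0 then [i, PySem.Int.floordiv x i] else []))]
    · rw [PySem.List.foldl_append_eq_flatMap]; simp
    · intro acc i _
      by_cases h : PySem.Int.mod x i = 0 <;> simp [h]
  simp only [factorList, List.mem_cons, hcongr, List.mem_flatMap]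
  constructor
  · rintro (rfl | ⟨i, hi, hd⟩)
    · exact Or.inl rfl
    · right
      by_cases hcnd : PySem.Int.mod x i = 0
      · rw [if_pos hcnd] at hd
        simp only [List.mem_cons, List.not_mem_nil, or_false] at hd
        exact ⟨i, hi, hcnd, hd⟩
      · rw [if_neg hcnd] at hd
        simp at hd
  · rintro (rfl | ⟨i, hi, hc, hd⟩)
    · exact Or.inl rfl
    · right
      refine ⟨i, hi, ?_⟩
      rw [if_pos hc]
      rcases hd with rfl | rfl <;> simp

lemma factor_le {x d : Int} (h : d ∈ factorList x) : d ≤ x := by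
  rcases (mem_factorList x d).1 h with rfl | ⟨i, hi, hmod, hd⟩
  · omega
  · have hi' := PySem.List.mem_pyRange_one.1 hi
    have hisq := isqrt_le x
    rcases hd with rfl | rfl
    · omega
    · rw [PySem.Int.floordiv_eq_ediv_of_pos (by omega : (0:Int) < i)]
      exact le_trans (Int.ediv_le_self i (by omega)) (le_refl x)

lemma mem_divfold (x d : Int) : ∀ (l : List Int) (s : PySem.Set Int),
    (d ∈ l.foldl (fun s i => if PySem.Int.mod x i = 0 then
        PySem.Set.add (PySem.Set.add s i) (PySem.Int.floordiv x i) else s) s ↔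
      d ∈ s ∨ ∃ i ∈ l, PySem.Int.mod x i = 0 ∧ (d = i ∨ d = PySem.Int.floordiv x i)) := by
  intro l
  induction l with
  | nil => simp
  | cons i t ih =>
    intro s
    simp only [List.foldl_cons]
    by_cases hc : PySem.Int.mod x i = 0
    · rw [if_pos hc, ih]
      constructor
      · rintro (hs | ⟨j, hj, hm, hd⟩)
        · rw [PySem.Set.mem_add] at hs
          rcases hs with hs | rfl
          · rw [PySem.Set.mem_add] at hs
            rcases hs with hs | rfl
            · exact Or.inl hs
            · exact Or.inr ⟨d, List.mem_cons_self .., hc, Or.inl rfl⟩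
          · exact Or.inr ⟨i, List.mem_cons_self .., hc, Or.inr rfl⟩
        · exact Or.inr ⟨j, List.mem_cons_of_mem _ hj, hm, hd⟩
      · rintro (hs | ⟨j, hj, hm, hd⟩)
        · left
          rw [PySem.Set.mem_add, PySem.Set.mem_add]
          exact Or.inl (Or.inl hs)
        · rcases List.mem_cons.1 hj with rfl | hj
          · left
            rw [PySem.Set.mem_add, PySem.Set.mem_add]
            rcases hd with rfl | rfl
            · exact Or.inl (Or.inr rfl)
            · exact Or.inr rfl
          · exact Or.inr ⟨j, hj, hm, hd⟩
    · rw [if_neg hc, ih]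
      constructor
      · rintro (hs | ⟨j, hj, hm, hd⟩)
        · exact Or.inl hs
        · exact Or.inr ⟨j, List.mem_cons_of_mem _ hj, hm, hd⟩
      · rintro (hs | ⟨j, hj, hm, hd⟩)
        · exact Or.inl hs
        · rcases List.mem_cons.1 hj with rfl | hj
          · exact absurd hm hc
          · exact Or.inr ⟨j, hj, hm, hd⟩

lemma mem_divSet (x d : Int) : d ∈ divSet x ↔ d ∈ factorList x := by
  unfold divSet
  rw [mem_divfold, mem_factorList]
  constructor
  · rintro (hs | ⟨i, hi, hm, hd⟩)
    · left
      have := (PySem.Set.mem_ofList [x] d).1 hs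
      simpa using this
    · exact Or.inr ⟨i, hi, hm, hd⟩
  · rintro (rfl | ⟨i, hi, hm, hd⟩)
    · exact Or.inl ((PySem.Set.mem_ofList [d] d).2 (by simp))
    · exact Or.inr ⟨i, hi, hm, hd⟩

-- one step / the whole fold of A's inner pass, as named functions
def passStep (other : PySem.Dict Int Int) (num : Int)
    (st : PySem.Dict Int Int × Int × Int) (i : Int) : PySem.Dict Int Int × Int × Int :=
  if st.1.contains i then st
  else if other.contains i ∧ st.2.1 < i then (st.1.insert i num, i, other.getD i 0 + num)
  else (st.1.insert i num, st.2.1, st.2.2)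

def passFold (other : PySem.Dict Int Int) (num : Int) (l : List Int)
    (st : PySem.Dict Int Int × Int × Int) : PySem.Dict Int Int × Int × Int :=
  l.foldl (passStep other num) st

lemma onePass_eq_passFold (other : PySem.Dict Int Int) (num : Int)
    (st : PySem.Dict Int Int × Int × Int) :
    onePass other num st = passFold other num (factorList num) st := rfl

lemma passFold_cons (other : PySem.Dict Int Int) (num i : Int) (l : List Int)
    (st : PySem.Dict Int Int × Int × Int) :
    passFold other num (i :: l) st = passFold other num l (passStep other num st i) := rfl

lemma passStep_cases (other : PySem.Dict Int Int) (num : Int)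
    (own : PySem.Dict Int Int) (g s i : Int) :
    (own.contains i = true ∧ passStep other num (own, g, s) i = (own, g, s)) ∨
    (own.contains i = false ∧ other.contains i = true ∧ g < i ∧
      passStep other num (own, g, s) i = (own.insert i num, i, other.getD i 0 + num)) ∨
    (own.contains i = false ∧ ¬ (other.contains i = true ∧ g < i) ∧
      passStep other num (own, g, s) i = (own.insert i num, g, s)) := by
  by_cases hc : own.contains i = true
  · left; exact ⟨hc, by simp [passStep, hc]⟩
  · by_cases hu : other.contains i = true ∧ g < i
    · right; left
      exact ⟨by simpa using hc, hu.1, hu.2, by simp [passStep, hc, hu]⟩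
    · right; right
      exact ⟨by simpa using hc, hu, by simp [passStep, hc, hu]⟩

lemma contains_false_get? (m : PySem.Dict Int Int) (i : Int) (h : m.contains i = false) :
    m.get? i = none := by
  rw [PySem.Dict.contains_eq_isSome_get?] at h
  exact Option.not_isSome_iff_eq_none.1 (by simp [h])

lemma passFold_get? (other : PySem.Dict Int Int) (num : Int) :
    ∀ (l : List Int) (own : PySem.Dict Int Int) (g s k : Int),
      (passFold other num l (own, g, s)).1.get? k =
        if (own.get? k).isSome then own.get? k else if k ∈ l then some num else none := by
  intro l
  induction l with
  | nil =>
    intro own g s k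
    simp only [passFold, List.foldl_nil, List.not_mem_nil, if_false]
    cases h : own.get? k <;> simp
  | cons i t ih =>
    intro own g s k
    rw [passFold_cons]
    rcases passStep_cases other num own g s i with ⟨hc, hst⟩ | ⟨hc, _, _, hst⟩ | ⟨hc, _, hst⟩
    · rw [hst, ih]
      by_cases hk : k = i
      · subst hk
        rw [PySem.Dict.contains_eq_isSome_get?] at hc
        simp [hc]
      · simp [List.mem_cons, hk]
    · rw [hst, ih]
      by_cases hk : k = i
      · subst hk
        have h0 := contains_false_get? own k hc
        simp [h0]
      · simp [PySem.Dict.get?_insert, hk, List.mem_cons]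
    · rw [hst, ih]
      by_cases hk : k = i
      · subst hk
        have h0 := contains_false_get? own k hc
        simp [h0]
      · simp [PySem.Dict.get?_insert, hk, List.mem_cons]

lemma passFold_le (other : PySem.Dict Int Int) (num : Int) :
    ∀ (l : List Int) (own : PySem.Dict Int Int) (g s : Int),
      g ≤ (passFold other num l (own, g, s)).2.1 := by
  intro l
  induction l with
  | nil => intro own g s; simp [passFold]
  | cons i t ih =>
    intro own g s
    rw [passFold_cons]
    rcases passStep_cases other num own g s i with ⟨_, hst⟩ | ⟨_, _, hlt, hst⟩ | ⟨_, _, hst⟩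
    · rw [hst]; exact ih own g s
    · rw [hst]; exact le_trans (le_of_lt hlt) (ih _ i _)
    · rw [hst]; exact ih _ g s

lemma passFold_update (other : PySem.Dict Int Int) (num : Int) :
    ∀ (l : List Int) (own : PySem.Dict Int Int) (g s : Int),
      ((passFold other num l (own, g, s)).2.1 = g ∧ (passFold other num l (own, g, s)).2.2 = s) ∨
      ((passFold other num l (own, g, s)).2.1 ∈ l ∧
        own.get? ((passFold other num l (own, g, s)).2.1) = none ∧
        other.contains ((passFold other num l (own, g, s)).2.1) = true ∧
        g < (passFold other num l (own, g, s)).2.1 ∧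
        (passFold other num l (own, g, s)).2.2 =
          other.getD ((passFold other num l (own, g, s)).2.1) 0 + num) := by
  intro l
  induction l with
  | nil => intro own g s; left; simp [passFold]
  | cons i t ih =>
    intro own g s
    rw [passFold_cons]
    rcases passStep_cases other num own g s i with ⟨hc, hst⟩ | ⟨hc, ho, hlt, hst⟩ | ⟨hc, hno, hst⟩
    · rw [hst]
      rcases ih own g s with h | ⟨h1, h2, h3, h4, h5⟩
      · exact Or.inl h
      · exact Or.inr ⟨List.mem_cons_of_mem _ h1, h2, h3, h4, h5⟩
    · rw [hst]
      right
      rcases ih (own.insert i num) i (other.getD i 0 + num) with ⟨h1, h2⟩ | ⟨h1, h2, h3, h4, h5⟩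
      · rw [h1, h2]
        exact ⟨List.mem_cons_self .., contains_false_get? own i hc, ho, hlt, rfl⟩
      · rw [PySem.Dict.get?_insert] at h2
        have hne : (passFold other num t (own.insert i num, i, other.getD i 0 + num)).2.1 ≠ i := by
          intro he; rw [if_pos he] at h2; simp at h2
        rw [if_neg hne] at h2
        exact ⟨List.mem_cons_of_mem _ h1, h2, h3, lt_trans hlt h4, h5⟩
    · rw [hst]
      rcases ih (own.insert i num) g s with h | ⟨h1, h2, h3, h4, h5⟩
      · exact Or.inl h
      · rw [PySem.Dict.get?_insert] at h2
        have hne : (passFold other num t (own.insert i num, g, s)).2.1 ≠ i := by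
          intro he; rw [if_pos he] at h2; simp at h2
        rw [if_neg hne] at h2
        exact Or.inr ⟨List.mem_cons_of_mem _ h1, h2, h3, h4, h5⟩

lemma passFold_max (other : PySem.Dict Int Int) (num : Int) :
    ∀ (l : List Int) (own : PySem.Dict Int Int) (g s i : Int), i ∈ l →
      own.get? i = none → other.contains i = true →
      i ≤ (passFold other num l (own, g, s)).2.1 := by
  intro l
  induction l with
  | nil => intro own g s i h; simp at h
  | cons j t ih =>
    intro own g s i hmem hi ho
    rw [passFold_cons]
    by_cases hij : i = j
    · subst hij
      rcases passStep_cases other num own g s i with ⟨hc, _⟩ | ⟨_, _, _, hst⟩ | ⟨hc, hno, hst⟩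
      · rw [PySem.Dict.contains_eq_isSome_get?, hi] at hc; simp at hc
      · rw [hst]; exact passFold_le other num t _ i _
      · rw [hst]
        have : i ≤ g := by
          by_contra hgi
          exact hno ⟨ho, by omega⟩
        exact le_trans this (passFold_le other num t _ g _)
    · have hit : i ∈ t := by
        rcases List.mem_cons.1 hmem with h | h
        · exact absurd h hij
        · exact h
      rcases passStep_cases other num own g s j with ⟨_, hst⟩ | ⟨_, _, _, hst⟩ | ⟨_, _, hst⟩
      · rw [hst]; exact ih own g s i hit hi ho
      · rw [hst]
        exact ih _ _ _ i hit (by rw [PySem.Dict.get?_insert, if_neg hij]; exact hi) ho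
      · rw [hst]
        exact ih _ _ _ i hit (by rw [PySem.Dict.get?_insert, if_neg hij]; exact hi) ho

lemma step_inv {As Bs : List Int} {da db : PySem.Dict Int Int} {g s : Int} (na nb : Int)
    (h : StInv As Bs da db g s) :
    StInv (As ++ [na]) (Bs ++ [nb]) (onePass db na (da, g, s)).1
      (onePass (onePass db na (da, g, s)).1 nb (db, (onePass db na (da, g, s)).2.1, (onePass db na (da, g, s)).2.2)).1
      (onePass (onePass db na (da, g, s)).1 nb (db, (onePass db na (da, g, s)).2.1, (onePass db na (da, g, s)).2.2)).2.1
      (onePass (onePass db na (da, g, s)).1 nb (db, (onePass db na (da, g, s)).2.1, (onePass db na (da, g, s)).2.2)).2.2 := by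
  obtain ⟨hA, hB, hBest, hg0, hs0, hsum⟩ := h
  rw [onePass_eq_passFold]
  set ra := passFold db na (factorList na) (da, g, s) with hra
  rw [onePass_eq_passFold]
  set rb := passFold ra.1 nb (factorList nb) (db, ra.2.1, ra.2.2) with hrb
  -- facts about the a-pass
  have pa_get : ∀ k, ra.1.get? k = if (da.get? k).isSome then da.get? k
      else if k ∈ factorList na then some na else none := fun k => by
    rw [hra]; exact passFold_get? db na (factorList na) da g s k
  have pa_le : g ≤ ra.2.1 := by rw [hra]; exact passFold_le db na _ da g s
  have pa_up : (ra.2.1 = g ∧ ra.2.2 = s) ∨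
      (ra.2.1 ∈ factorList na ∧ da.get? ra.2.1 = none ∧ db.contains ra.2.1 = true ∧
        g < ra.2.1 ∧ ra.2.2 = db.getD ra.2.1 0 + na) := by
    rw [hra]; exact passFold_update db na (factorList na) da g s
  have pa_max : ∀ i ∈ factorList na, da.get? i = none → db.contains i = true → i ≤ ra.2.1 :=
    fun i hi h1 h2 => by rw [hra]; exact passFold_max db na _ da g s i hi h1 h2
  -- facts about the b-pass (own = db, other = ra.1)
  have pb_get : ∀ k, rb.1.get? k = if (db.get? k).isSome then db.get? k
      else if k ∈ factorList nb then some nb else none := fun k => by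
    rw [hrb]; exact passFold_get? ra.1 nb (factorList nb) db ra.2.1 ra.2.2 k
  have pb_le : ra.2.1 ≤ rb.2.1 := by rw [hrb]; exact passFold_le ra.1 nb _ db _ _
  have pb_up : (rb.2.1 = ra.2.1 ∧ rb.2.2 = ra.2.2) ∨
      (rb.2.1 ∈ factorList nb ∧ db.get? rb.2.1 = none ∧ ra.1.contains rb.2.1 = true ∧
        ra.2.1 < rb.2.1 ∧ rb.2.2 = ra.1.getD rb.2.1 0 + nb) := by
    rw [hrb]; exact passFold_update ra.1 nb (factorList nb) db ra.2.1 ra.2.2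
  have pb_max : ∀ i ∈ factorList nb, db.get? i = none → ra.1.contains i = true → i ≤ rb.2.1 :=
    fun i hi h1 h2 => by rw [hrb]; exact passFold_max ra.1 nb _ db ra.2.1 ra.2.2 i hi h1 h2
  -- dict characterisations in terms of fw
  have hA' : ∀ k, ra.1.get? k = fw k (As ++ [na]) := by
    intro k
    rw [pa_get k, fw_snoc, hA k]
  have hB' : ∀ k, rb.1.get? k = fw k (Bs ++ [nb]) := by
    intro k
    rw [pb_get k, fw_snoc, hB k]
  have hgm := bestMax hBest
  -- maximality over the extended lists
  have hmax : ∀ d, 0 < d → CommonD (As ++ [na]) (Bs ++ [nb]) d → d ≤ rb.2.1 := by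
    rintro d hd ⟨⟨x, hx, hdx⟩, ⟨y, hy, hdy⟩⟩
    rw [List.mem_append, List.mem_singleton] at hx hy
    by_cases hfb : (fw d Bs).isSome
    · obtain ⟨y', hy', hdy'⟩ := (fw_isSome_iff d Bs).1 hfb
      by_cases hfa : (fw d As).isSome
      · obtain ⟨x', hx', hdx'⟩ := (fw_isSome_iff d As).1 hfa
        exact le_trans (le_trans (hgm d hd ⟨⟨x', hx', hdx'⟩, ⟨y', hy', hdy'⟩⟩) pa_le) pb_le
      · have hxna : d ∈ factorList na := by
          rcases hx with hx | rfl
          · exact absurd ((fw_isSome_iff d As).2 ⟨x, hx, hdx⟩) hfa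
          · exact hdx
        have hda0 : da.get? d = none := by
          rw [hA d]; exact Option.not_isSome_iff_eq_none.1 hfa
        have hdbc : db.contains d = true := by
          rw [PySem.Dict.contains_eq_isSome_get?, hB d]; exact hfb
        exact le_trans (pa_max d hxna hda0 hdbc) pb_le
    · have hynb : d ∈ factorList nb := by
        rcases hy with hy | rfl
        · exact absurd ((fw_isSome_iff d Bs).2 ⟨y, hy, hdy⟩) hfb
        · exact hdy
      have hdb0 : db.get? d = none := by
        rw [hB d]; exact Option.not_isSome_iff_eq_none.1 hfb
      have hda'c : ra.1.contains d = true := by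
        rw [PySem.Dict.contains_eq_isSome_get?, hA' d, fw_snoc_isSome]
        rcases hx with hx | rfl
        · exact Or.inl ((fw_isSome_iff d As).2 ⟨x, hx, hdx⟩)
        · exact Or.inr hdx
      exact pb_max d hynb hdb0 hda'c
  -- common witness when the final value is positive
  have hwit : 0 < rb.2.1 → CommonD (As ++ [na]) (Bs ++ [nb]) rb.2.1 := by
    intro hpos
    rcases pb_up with ⟨hg21, _⟩ | ⟨hg2f, hdb0, hda'c, _, _⟩
    · rcases pa_up with ⟨hg1g, _⟩ | ⟨hg1f, hda0, hdbc, _, _⟩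
      · -- rb.2.1 = ra.2.1 = g
        have hgpos : 0 < g := by omega
        rcases hBest with ⟨h0, _⟩ | ⟨_, hc, _⟩
        · omega
        · rw [hg21, hg1g]; exact commonD_mono _ _ hc
      · -- updated in the a-pass
        rw [hg21]
        have hbs : (fw ra.2.1 Bs).isSome := by
          rw [← hB ra.2.1, ← PySem.Dict.contains_eq_isSome_get?]; exact hdbc
        obtain ⟨y', hy', hdy'⟩ := (fw_isSome_iff _ Bs).1 hbs
        exact ⟨⟨na, by simp, hg1f⟩, ⟨y', List.mem_append.2 (Or.inl hy'), hdy'⟩⟩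
    · -- updated in the b-pass
      have hxs : (fw rb.2.1 (As ++ [na])).isSome := by
        rw [← hA' rb.2.1, ← PySem.Dict.contains_eq_isSome_get?]; exact hda'c
      obtain ⟨x', hx', hdx'⟩ := (fw_isSome_iff _ _).1 hxs
      exact ⟨⟨x', hx', hdx'⟩, ⟨nb, by simp, hg2f⟩⟩
  have hg2nn : 0 ≤ rb.2.1 := le_trans hg0 (le_trans pa_le pb_le)
  refine ⟨hA', hB', ?_, hg2nn, ?_, ?_⟩
  · -- IsBest
    by_cases hpos : 0 < rb.2.1
    · exact Or.inr ⟨hpos, hwit hpos, hmax⟩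
    · left
      refine ⟨by omega, fun d hd hc => ?_⟩
      have := hmax d hd hc
      omega
  · -- final g = 0 → s = 0
    intro hz
    have hgz : g = 0 := by omega
    have hg1z : ra.2.1 = 0 := by omega
    rcases pb_up with ⟨_, hs21⟩ | ⟨_, _, _, hlt, _⟩
    · rcases pa_up with ⟨_, hs1s⟩ | ⟨_, _, _, hltg, _⟩
      · rw [hs21, hs1s]; exact hs0 hgz
      · omega
    · omega
  · -- final g > 0 → s = sumFor
    intro hpos
    rcases pb_up with ⟨hg21, hs21⟩ | ⟨hg2f, hdb0, hda'c, hlt, hs2⟩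
    · rcases pa_up with ⟨hg1g, hs1s⟩ | ⟨hg1f, hda0, hdbc, hltg, hs1⟩
      · -- no update at all: rb.2.1 = g
        have hgpos : 0 < g := by omega
        have hs : ra.2.2 = sumFor As Bs g := by rw [hs1s]; exact hsum hgpos
        rcases hBest with ⟨h0, _⟩ | ⟨_, ⟨hcx, hcy⟩, _⟩
        · omega
        · have hax : (fw g As).isSome := (fw_isSome_iff _ _).2 hcx
          have hby : (fw g Bs).isSome := (fw_isSome_iff _ _).2 hcy
          rw [hs21, hs, hg21, hg1g]
          unfold sumFor
          rw [fw_append_of_isSome _ _ _ hax, fw_append_of_isSome _ _ _ hby]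
      · -- updated in the a-pass only
        have hbs : (fw ra.2.1 Bs).isSome := by
          rw [← hB ra.2.1, ← PySem.Dict.contains_eq_isSome_get?]; exact hdbc
        obtain ⟨w, hw⟩ := Option.isSome_iff_exists.1 hbs
        have hfa : fw ra.2.1 As = none := by rw [← hA ra.2.1]; exact hda0
        rw [hs21, hs1, hg21]
        unfold sumFor
        rw [fw_append_of_isSome _ _ _ hbs, hw]
        rw [fw_snoc, hfa]
        simp only [Option.isSome_none, Bool.false_eq_true, if_false, if_pos hg1f]
        have : db.getD ra.2.1 0 = w := by
          rw [PySem.Dict.getD_eq_get?_getD, hB ra.2.1, hw]; rfl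
        rw [this]
        simp only [Option.getD_some]
        omega
    · -- updated in the b-pass
      have hxs : (fw rb.2.1 (As ++ [na])).isSome := by
        rw [← hA' rb.2.1, ← PySem.Dict.contains_eq_isSome_get?]; exact hda'c
      obtain ⟨v, hv⟩ := Option.isSome_iff_exists.1 hxs
      have hfb : fw rb.2.1 Bs = none := by rw [← hB rb.2.1]; exact hdb0
      rw [hs2]
      unfold sumFor
      rw [hv, fw_snoc, hfb]
      simp only [Option.isSome_none, Bool.false_eq_true, if_false, if_pos hg2f]
      have : ra.1.getD rb.2.1 0 = v := by
        rw [PySem.Dict.getD_eq_get?_getD, hA' rb.2.1, hv]; rfl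
      rw [this]
      simp only [Option.getD_some]

lemma exit_spec {As Bs : List Int} {g : Int} (xs ys : List Int)
    (hB : IsBest As Bs g)
    (hx : ∀ x ∈ xs, x < g) (hy : ∀ y ∈ ys, y < g) :
    IsBest (As ++ xs) (Bs ++ ys) g ∧ (0 < g → sumFor (As ++ xs) (Bs ++ ys) g = sumFor As Bs g) := by
  have hgm := bestMax hB
  have hmax : ∀ d, 0 < d → CommonD (As ++ xs) (Bs ++ ys) d → d ≤ g := by
    rintro d hd ⟨⟨x, hxm, hdx⟩, ⟨y, hym, hdy⟩⟩
    rw [List.mem_append] at hxm hym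
    rcases hxm with hxm | hxm
    · rcases hym with hym | hym
      · exact hgm d hd ⟨⟨x, hxm, hdx⟩, ⟨y, hym, hdy⟩⟩
      · have h1 := factor_le hdy
        have h2 := hy y hym
        omega
    · have h1 := factor_le hdx
      have h2 := hx x hxm
      omega
  constructor
  · rcases hB with ⟨h0, hno⟩ | ⟨hp, hc, _⟩
    · left
      refine ⟨h0, fun d hd hcom => ?_⟩
      have := hmax d hd hcom
      omega
    · exact Or.inr ⟨hp, commonD_mono _ _ hc, hmax⟩
  · intro hg
    rcases hB with ⟨h0, _⟩ | ⟨_, ⟨hcx, hcy⟩, _⟩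
    · omega
    · unfold sumFor
      rw [fw_append_of_isSome _ _ _ ((fw_isSome_iff _ _).2 hcx),
        fw_append_of_isSome _ _ _ ((fw_isSome_iff _ _).2 hcy)]

lemma gcdLoop_spec : ∀ (pairs : List (Int × Int)) (As Bs : List Int)
    (da db : PySem.Dict Int Int) (g s : Int),
    StInv As Bs da db g s →
    (As ++ pairs.map Prod.fst).Pairwise (· ≥ ·) →
    (Bs ++ pairs.map Prod.snd).Pairwise (· ≥ ·) →
    ∀ gf, IsBest (As ++ pairs.map Prod.fst) (Bs ++ pairs.map Prod.snd) gf →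
    gcdLoop pairs da db g s =
      if 0 < gf then sumFor (As ++ pairs.map Prod.fst) (Bs ++ pairs.map Prod.snd) gf else 0 := by
  intro pairs
  induction pairs with
  | nil =>
    intro As Bs da db g s h _ _ gf hgf
    obtain ⟨_, _, hBest, hg0, hs0, hsum⟩ := h
    simp only [List.map_nil, List.append_nil] at hgf ⊢
    have hgg : g = gf := isBest_unique hBest hgf
    subst hgg
    show s = if 0 < g then sumFor As Bs g else 0
    by_cases hp : 0 < g
    · rw [if_pos hp]; exact hsum hp
    · rw [if_neg hp]; exact hs0 (by omega)
  | cons p rest ih =>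
    obtain ⟨na, nb⟩ := p
    intro As Bs da db g s h hpa hpb gf hgf
    simp only [List.map_cons] at hpa hpb hgf ⊢
    by_cases hex : na < g ∧ nb < g
    · -- early exit
      simp only [gcdLoop]
      rw [if_pos hex]
      obtain ⟨_, _, hBest, hg0, hs0, hsum⟩ := h
      have hsubA : (na :: rest.map Prod.fst).Pairwise (· ≥ ·) :=
        hpa.sublist (List.sublist_append_right As _)
      have hsubB : (nb :: rest.map Prod.snd).Pairwise (· ≥ ·) :=
        hpb.sublist (List.sublist_append_right Bs _)
      have hxall : ∀ x ∈ (na :: rest.map Prod.fst), x < g := by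
        intro x hxm
        rcases List.mem_cons.1 hxm with rfl | hxm
        · exact hex.1
        · have := (List.pairwise_cons.1 hsubA).1 x hxm
          omega
      have hyall : ∀ y ∈ (nb :: rest.map Prod.snd), y < g := by
        intro y hym
        rcases List.mem_cons.1 hym with rfl | hym
        · exact hex.2
        · have := (List.pairwise_cons.1 hsubB).1 y hym
          omega
      obtain ⟨hIs', hsum'⟩ := exit_spec _ _ hBest hxall hyall
      have hgg : g = gf := isBest_unique hIs' hgf
      subst hgg
      by_cases hp : 0 < g
      · rw [if_pos hp, hsum' hp]; exact hsum hp
      · rw [if_neg hp]; exact hs0 (by omega)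
    · -- process one pair
      simp only [gcdLoop]
      rw [if_neg hex]
      have h' := step_inv na nb h
      have heqA : (As ++ [na]) ++ rest.map Prod.fst = As ++ (na :: rest.map Prod.fst) := by simp
      have heqB : (Bs ++ [nb]) ++ rest.map Prod.snd = Bs ++ (nb :: rest.map Prod.snd) := by simp
      have := ih (As ++ [na]) (Bs ++ [nb]) _ _ _ _ h'
        (by rw [heqA]; exact hpa) (by rw [heqB]; exact hpb) gf
        (by rw [heqA, heqB]; exact hgf)
      rw [heqA, heqB] at this
      exact this

-- B-side: setdefault keeps first-seen values
lemma setdefault_eq (m : PySem.Dict Int Int) (k v : Int) :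
    m.setdefault k v = if m.contains k then m else m.insert k v := by
  by_cases h : m.contains k = true
  · simp [PySem.Dict.setdefault, h]
  · simp only [PySem.Dict.setdefault, h, if_false, Bool.false_eq_true]
    apply PySem.Dict.ext
    rw [PySem.Dict.items_insert_of_not_contains _ _ (by simpa using h)]

lemma setdefault_fold (x : Int) : ∀ (l : List Int) (m : PySem.Dict Int Int) (k : Int),
    ((l.foldl (fun m d => m.setdefault d x) m).get? k) =
      if (m.get? k).isSome then m.get? k else if k ∈ l then some x else none := by
  intro l
  induction l with
  | nil =>
    intro m k
    simp only [List.foldl_nil, List.not_mem_nil, if_false]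
    cases h : m.get? k <;> simp
  | cons d t ih =>
    intro m k
    simp only [List.foldl_cons]
    rw [setdefault_eq]
    by_cases hc : m.contains d = true
    · rw [if_pos hc, ih]
      by_cases hk : k = d
      · subst hk
        rw [PySem.Dict.contains_eq_isSome_get?] at hc
        simp [hc]
      · simp [List.mem_cons, hk]
    · rw [if_neg hc, ih]
      by_cases hk : k = d
      · subst hk
        have h0 := contains_false_get? m k (by simpa using hc)
        simp [h0]
      · simp [PySem.Dict.get?_insert, hk, List.mem_cons]

lemma buildMap_go : ∀ (xs As : List Int) (m : PySem.Dict Int Int),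
    (∀ k, m.get? k = fw k As) →
    ∀ k, (xs.foldl (fun m x => (divSet x).foldl (fun m d => m.setdefault d x) m) m).get? k =
      fw k (As ++ xs) := by
  intro xs
  induction xs with
  | nil => intro As m hm k; simpa using hm k
  | cons x t ih =>
    intro As m hm k
    simp only [List.foldl_cons]
    have hm' : ∀ k, ((divSet x).foldl (fun m d => m.setdefault d x) m).get? k =
        fw k (As ++ [x]) := by
      intro k
      rw [setdefault_fold, fw_snoc, hm k]
      by_cases h1 : (fw k As).isSome
      · simp [h1]
      · simp only [h1, if_false, Bool.false_eq_true]
        by_cases h2 : k ∈ factorList x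
        · rw [if_pos ((mem_divSet x k).2 h2), if_pos h2]
        · rw [if_neg (fun hc => h2 ((mem_divSet x k).1 hc)), if_neg h2]
    have := ih (As ++ [x]) _ hm' k
    rw [this]
    simp

lemma buildMap_get? (xs : List Int) (k : Int) : (buildMap xs).get? k = fw k xs := by
  have := buildMap_go xs [] PySem.Dict.empty (fun k => by simp [PySem.Dict.get?_empty, fw]) k
  simpa [buildMap] using this

lemma best_fold (mb : PySem.Dict Int Int) : ∀ (ks : List Int) (b0 : Int),
    b0 ≤ ks.foldl (fun best g => if best < g ∧ mb.contains g then g else best) b0 ∧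
    (ks.foldl (fun best g => if best < g ∧ mb.contains g then g else best) b0 = b0 ∨
      (ks.foldl (fun best g => if best < g ∧ mb.contains g then g else best) b0 ∈ ks ∧
       mb.contains (ks.foldl (fun best g => if best < g ∧ mb.contains g then g else best) b0) = true)) ∧
    (∀ g ∈ ks, mb.contains g = true →
      g ≤ ks.foldl (fun best g => if best < g ∧ mb.contains g then g else best) b0) := by
  intro ks
  induction ks with
  | nil => intro b0; simp
  | cons j t ih =>
    intro b0
    simp only [List.foldl_cons]
    by_cases hc : b0 < j ∧ mb.contains j = true
    · rw [if_pos hc]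
      obtain ⟨h1, h2, h3⟩ := ih j
      refine ⟨le_trans (le_of_lt hc.1) h1, ?_, ?_⟩
      · rcases h2 with h2 | ⟨h2a, h2b⟩
        · exact Or.inr ⟨by rw [h2]; exact List.mem_cons_self .., by rw [h2]; exact hc.2⟩
        · exact Or.inr ⟨List.mem_cons_of_mem _ h2a, h2b⟩
      · intro g hg hgc
        rcases List.mem_cons.1 hg with rfl | hg
        · exact h1
        · exact h3 g hg hgc
    · rw [if_neg hc]
      obtain ⟨h1, h2, h3⟩ := ih b0
      refine ⟨h1, ?_, ?_⟩
      · rcases h2 with h2 | ⟨h2a, h2b⟩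
        · exact Or.inl h2
        · exact Or.inr ⟨List.mem_cons_of_mem _ h2a, h2b⟩
      · intro g hg hgc
        rcases List.mem_cons.1 hg with rfl | hg
        · by_cases hlt : b0 < g
          · exact absurd ⟨hlt, hgc⟩ hc
          · omega
        · exact h3 g hg hgc

lemma zip_map_fst_take (l1 l2 : List Int) :
    (l1.zip l2).map Prod.fst = l1.take (min l1.length l2.length) := by
  induction l1 generalizing l2 with
  | nil => simp
  | cons a t ih =>
    cases l2 with
    | nil => simp
    | cons b u => simp [List.zip_cons_cons, ih u, Nat.succ_min_succ]

lemma zip_map_snd_take (l1 l2 : List Int) :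
    (l1.zip l2).map Prod.snd = l2.take (min l1.length l2.length) := by
  induction l1 generalizing l2 with
  | nil => simp
  | cons a t ih =>
    cases l2 with
    | nil => simp
    | cons b u => simp [List.zip_cons_cons, ih u, Nat.succ_min_succ]

-- ===== VERDICT (by name: the statement is the Claim_ definition above) =====
theorem gcd_sum_spec : Claim_equal_gcd_sum := by
  intro arr_a arr_b _hdom
  show gcd_sum arr_a arr_b = gcd_sum_alt arr_a arr_b
  simp only [gcd_sum, gcd_sum_alt]
  set sa := PySem.List.sorted arr_a (fun x => x) true with hsa
  set sb := PySem.List.sorted arr_b (fun x => x) true with hsb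
  set K : Nat := min sa.length sb.length with hK
  have hkcast : (min (PySem.List.len sa) (PySem.List.len sb)) = ((K : Nat) : Int) := by
    simp only [PySem.List.len_eq, hK]
    omega
  have hslA : PySem.List.slice sa none (some (min (PySem.List.len sa) (PySem.List.len sb))) = sa.take K := by
    rw [hkcast, PySem.List.slice_to _ (by exact_mod_cast Nat.zero_le K)]
    simp
  have hslB : PySem.List.slice sb none (some (min (PySem.List.len sa) (PySem.List.len sb))) = sb.take K := by
    rw [hkcast, PySem.List.slice_to _ (by exact_mod_cast Nat.zero_le K)]
    simp
  rw [hslA, hslB]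
  set la := sa.take K with hla
  set lb := sb.take K with hlb
  set mapA := buildMap la with hmapA
  set mapB := buildMap lb with hmapB
  set best := mapA.keys.foldl (fun best g => if best < g ∧ mapB.contains g then g else best) 0 with hbest
  -- key/contains characterisations
  have hkeysA : ∀ gg : Int, gg ∈ mapA.keys ↔ (fw gg la).isSome := by
    intro gg
    constructor
    · intro hm
      by_contra hns
      have h0 : mapA.get? gg = none := by
        rw [hmapA, buildMap_get?]
        exact Option.not_isSome_iff_eq_none.1 hns
      exact (PySem.Dict.get?_eq_none_iff_not_mem_keys mapA gg).1 h0 hm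
    · intro hs
      by_contra hm
      have h0 := (PySem.Dict.get?_eq_none_iff_not_mem_keys mapA gg).2 hm
      rw [hmapA, buildMap_get?] at h0
      rw [h0] at hs
      simp at hs
  have hcontB : ∀ gg : Int, mapB.contains gg = (fw gg lb).isSome := by
    intro gg
    rw [PySem.Dict.contains_eq_isSome_get?, hmapB, buildMap_get?]
  obtain ⟨hb1, hb2, hb3⟩ := best_fold mapB mapA.keys 0
  rw [← hbest] at hb1 hb2 hb3
  -- best is the maximal positive common divisor of (la, lb)
  have hIs : IsBest la lb best := by
    by_cases hpos : 0 < best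
    · right
      refine ⟨hpos, ?_, ?_⟩
      · rcases hb2 with h2 | ⟨h2a, h2b⟩
        · omega
        · have hsa' := (hkeysA best).1 h2a
          have hsb' : (fw best lb).isSome = true := by rw [← hcontB]; exact h2b
          exact ⟨(fw_isSome_iff _ _).1 hsa', (fw_isSome_iff _ _).1 hsb'⟩
      · rintro d hd ⟨hcx, hcy⟩
        have hda : d ∈ mapA.keys := (hkeysA d).2 ((fw_isSome_iff _ _).2 hcx)
        have hdb : mapB.contains d = true := by
          rw [hcontB]; exact (fw_isSome_iff _ _).2 hcy
        exact hb3 d hda hdb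
    · left
      have hbz : best = 0 := by omega
      refine ⟨hbz, ?_⟩
      rintro d hd ⟨hcx, hcy⟩
      have hda : d ∈ mapA.keys := (hkeysA d).2 ((fw_isSome_iff _ _).2 hcx)
      have hdb : mapB.contains d = true := by
        rw [hcontB]; exact (fw_isSome_iff _ _).2 hcy
      have := hb3 d hda hdb
      omega
  -- run A's loop
  have hzf : (sa.zip sb).map Prod.fst = la := by rw [zip_map_fst_take, ← hK, ← hla]
  have hzs : (sa.zip sb).map Prod.snd = lb := by rw [zip_map_snd_take, ← hK, ← hlb]
  have hinit : StInv [] [] PySem.Dict.empty PySem.Dict.empty 0 0 := by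
    refine ⟨fun k => by simp [PySem.Dict.get?_empty, fw], fun k => by simp [PySem.Dict.get?_empty, fw],
      Or.inl ⟨rfl, ?_⟩, le_refl 0, fun _ => rfl, fun h0 => absurd h0 (lt_irrefl 0)⟩
    rintro d hd ⟨⟨x, hx, _⟩, _⟩
    simp at hx
  have hpwA : (([] : List Int) ++ (sa.zip sb).map Prod.fst).Pairwise (· ≥ ·) := by
    rw [hzf, List.nil_append, hla]
    exact (((PySem.List.sorted_pairwise_rev arr_a (fun x => x)).imp (fun h => h)).sublist
      (List.take_sublist _ _))
  have hpwB : (([] : List Int) ++ (sa.zip sb).map Prod.snd).Pairwise (· ≥ ·) := by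
    rw [hzs, List.nil_append, hlb]
    exact (((PySem.List.sorted_pairwise_rev arr_b (fun x => x)).imp (fun h => h)).sublist
      (List.take_sublist _ _))
  have hA := gcdLoop_spec (sa.zip sb) [] [] PySem.Dict.empty PySem.Dict.empty 0 0 hinit
    hpwA hpwB best (by rw [hzf, hzs]; simpa using hIs)
  rw [hzf, hzs] at hA
  simp only [List.nil_append] at hA
  rw [hA]
  -- both sides agree
  by_cases hp : 0 < best
  · rw [if_pos hp, if_pos hp]
    unfold sumFor
    have hga : mapA.getD best 0 = (fw best la).getD 0 := by
      rw [PySem.Dict.getD_eq_get?_getD, hmapA, buildMap_get?]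
    have hgb : mapB.getD best 0 = (fw best lb).getD 0 := by
      rw [PySem.Dict.getD_eq_get?_getD, hmapB, buildMap_get?]
    rw [hga, hgb]
  · rw [if_neg hp, if_neg hp]
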